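-- pv_equiv track=rewrite | github.com/GeneralLi95/OpenGCC-Contest | 绿盟全国赛决赛参考答案/Python/第一阶段/step3/Task.py | concaveValley
-- ===== SOURCE A (Python) =====
-- def concaveValley(X):
--     res = 0
--     up = 0
--     down = 0
--     for i in range(1, len(X)):
--         if up > 0 and X[i - 1] > X[i] or X[i - 1] == X[i]:
--             up = down = 0
--         if X[i - 1] < X[i]:
--             up += 1
--         if X[i - 1] > X[i]:
--             down += 1
--         if up > 0 and down > 0 and up + down + 1 > res:
--             res = up + down + 1
--     return res
-- ===== SOURCE B (Python) =====
-- def concaveValley(X):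
--     # Run-jumping scan: hop over the maximal strictly-decreasing run, then the
--     # maximal strictly-increasing run; a valley exists when both are non-empty.
--     best = 0
--     i = 0
--     n = len(X)
--     while i + 1 < n:
--         j = i
--         while j + 1 < n and X[j] > X[j + 1]:
--             j += 1
--         k = j
--         while k + 1 < n and X[k] < X[k + 1]:
--             k += 1
--         if i < j < k:
--             best = max(best, k - i + 1)
--         i = k if k > i else i + 1
--     return best
-- ===== Notes on version B (the rewrite author's own statement) =====
-- stated objective: alternative
-- what changed: Replaced A's single streaming scan with reset counters (up/down maintained per step) by a run-jumping two-pointer scan that hops over each maximal strictly-decreasing run and then the maximal strictly-increasing run, scoring a valley from the run lengths.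
import Mathlib
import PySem

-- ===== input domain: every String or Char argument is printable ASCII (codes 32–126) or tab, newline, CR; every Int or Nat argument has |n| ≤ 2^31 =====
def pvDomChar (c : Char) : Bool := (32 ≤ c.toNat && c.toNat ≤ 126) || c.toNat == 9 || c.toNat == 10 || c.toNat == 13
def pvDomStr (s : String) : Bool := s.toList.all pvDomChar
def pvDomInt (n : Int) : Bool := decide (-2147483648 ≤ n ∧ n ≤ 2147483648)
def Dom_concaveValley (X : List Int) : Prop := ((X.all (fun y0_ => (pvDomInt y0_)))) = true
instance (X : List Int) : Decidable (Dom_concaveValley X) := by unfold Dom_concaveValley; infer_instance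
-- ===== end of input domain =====

-- B replaces A's streaming counters-with-reset scan by a run-jumping scan over
-- maximal monotone runs (objective: alternative decomposition, same O(n) cost).

-- ===== PORT A =====
-- the for-loop of A as structural recursion carrying (res, up, down) and the previous element
def concaveValleyLoop : Int × Int × Int → Int → List Int → Int × Int × Int
  | st, _, [] => st
  | (res, up, down), xp, xi :: rest =>
      let ud := if (up > 0 ∧ xp > xi) ∨ xp = xi then ((0 : Int), (0 : Int)) else (up, down)
      let up2 := if xp < xi then ud.1 + 1 else ud.1
      let down2 := if xp > xi then ud.2 + 1 else ud.2
      let res2 := if up2 > 0 ∧ down2 > 0 ∧ up2 + down2 + 1 > res then up2 + down2 + 1 else res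
      concaveValleyLoop (res2, up2, down2) xi rest

def concaveValley (X : List Int) : Int :=
  match X with
  | [] => 0
  | x :: r => (concaveValleyLoop (0, 0, 0) x r).1

-- ===== PORT B =====
-- the inner `while X[j] > X[j+1]` loop: length of the maximal strictly-decreasing run,
-- its last element, and the remaining list
def downRun : Int → List Int → Nat × Int × List Int
  | x, [] => (0, x, [])
  | x, y :: r =>
      if x > y then
        let p := downRun y r
        (p.1 + 1, p.2.1, p.2.2)
      else (0, x, y :: r)

-- the inner `while X[k] < X[k+1]` loop
def upRun : Int → List Int → Nat × Int × List Int
  | x, [] => (0, x, [])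
  | x, y :: r =>
      if x < y then
        let p := upRun y r
        (p.1 + 1, p.2.1, p.2.2)
      else (0, x, y :: r)

-- needed by go's termination proof
theorem downRun_len (x : Int) (l : List Int) :
    (downRun x l).2.2.length + (downRun x l).1 = l.length := by
  induction l generalizing x with
  | nil => simp [downRun]
  | cons y r ih =>
      by_cases h : x > y
      · simp only [downRun, if_pos h]
        have := ih y
        simpa using by omega
      · simp [downRun, if_neg h]

-- needed by go's termination proof
theorem upRun_len (x : Int) (l : List Int) :
    (upRun x l).2.2.length + (upRun x l).1 = l.length := by
  induction l generalizing x with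
  | nil => simp [upRun]
  | cons y r ih =>
      by_cases h : x < y
      · simp only [upRun, if_pos h]
        have := ih y
        simpa using by omega
      · simp [upRun, if_neg h]

-- the outer `while i + 1 < n` loop of B
def go (best : Int) (x : Int) (rest : List Int) : Int :=
  if 0 < (downRun x rest).1 + (upRun (downRun x rest).2.1 (downRun x rest).2.2).1 then
    go (if 0 < (downRun x rest).1 ∧ 0 < (upRun (downRun x rest).2.1 (downRun x rest).2.2).1 then
          max best (((downRun x rest).1 : Int) + ((upRun (downRun x rest).2.1 (downRun x rest).2.2).1 : Int) + 1)
        else best)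
      (upRun (downRun x rest).2.1 (downRun x rest).2.2).2.1
      (upRun (downRun x rest).2.1 (downRun x rest).2.2).2.2
  else
    match rest with
    | [] => best
    | y :: t => go best y t
termination_by rest.length
decreasing_by
  · have h1 := downRun_len x rest
    have h2 := upRun_len (downRun x rest).2.1 (downRun x rest).2.2
    omega
  · simp

def concaveValley_alt (X : List Int) : Int :=
  match X with
  | [] => 0
  | x :: r => go 0 x r

-- ===== PRECONDITION & SPEC =====
def Spec_concaveValley (X : List Int) (out : Int) : Prop := out = concaveValley_alt X
instance (X : List Int) (out : Int) : Decidable (Spec_concaveValley X out) := by unfold Spec_concaveValley; infer_instance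

-- ===== CLAIM (what is proved, stated in full; the proofs are below) =====
def Claim_equal_concaveValley : Prop := ∀ (X : List Int), Dom_concaveValley X → Spec_concaveValley X (concaveValley X)

-- ===== LEMMAS AND PROOFS =====

theorem downRun_zero (x : Int) (l : List Int) (h : (downRun x l).1 = 0) :
    downRun x l = (0, x, l) := by
  cases l with
  | nil => simp [downRun]
  | cons y r =>
      by_cases hxy : x > y
      · simp [downRun, hxy] at h
      · simp [downRun, hxy]

theorem upRun_zero (x : Int) (l : List Int) (h : (upRun x l).1 = 0) :
    upRun x l = (0, x, l) := by
  cases l with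
  | nil => simp [upRun]
  | cons y r =>
      by_cases hxy : x < y
      · simp [upRun, hxy] at h
      · simp [upRun, hxy]

theorem downRun_stop (x : Int) (l : List Int) (z : Int) (t : List Int)
    (h : (downRun x l).2.2 = z :: t) : (downRun x l).2.1 ≤ z := by
  induction l generalizing x with
  | nil => simp [downRun] at h
  | cons y r ih =>
      by_cases hxy : x > y
      · simp only [downRun, if_pos hxy] at h ⊢
        exact ih y h
      · simp only [downRun, if_neg hxy] at h ⊢
        obtain ⟨h1, -⟩ := List.cons.injEq .. ▸ h
        omega

theorem upRun_stop (x : Int) (l : List Int) (z : Int) (t : List Int)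
    (h : (upRun x l).2.2 = z :: t) : z ≤ (upRun x l).2.1 := by
  induction l generalizing x with
  | nil => simp [upRun] at h
  | cons y r ih =>
      by_cases hxy : x < y
      · simp only [upRun, if_pos hxy] at h ⊢
        exact ih y h
      · simp only [upRun, if_neg hxy] at h ⊢
        obtain ⟨h1, -⟩ := List.cons.injEq .. ▸ h
        omega

-- processing a whole strictly-decreasing run only increments the `down` counter
theorem loop_down (l : List Int) : ∀ (x r d0 : Int),
    concaveValleyLoop (r, 0, d0) x l =
      concaveValleyLoop (r, 0, d0 + ((downRun x l).1 : Int)) (downRun x l).2.1 (downRun x l).2.2 := by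
  induction l with
  | nil => intro x r d0; simp [downRun, concaveValleyLoop]
  | cons y t ih =>
      intro x r d0
      by_cases hxy : x > y
      · simp only [downRun, if_pos hxy]
        have hc : d0 + (((downRun y t).1 + 1 : Nat) : Int) = (d0 + 1) + ((downRun y t).1 : Int) := by
          push_cast; ring
        simp only [hc]
        rw [← ih y r (d0 + 1)]
        simp only [concaveValleyLoop]
        congr 1
        split_ifs <;> simp_all <;> omega
      · simp only [downRun, if_neg hxy]
        simp

-- processing a whole strictly-increasing run: `up` grows and `res` is maxed with the
-- valley length whenever a decreasing run preceded
theorem loop_up (l : List Int) : ∀ (x r u0 d : Int), 0 ≤ u0 → 0 ≤ d →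
    concaveValleyLoop (r, u0, d) x l =
      concaveValleyLoop
        ((if 0 < d ∧ 0 < ((upRun x l).1 : Int) then max r (u0 + ((upRun x l).1 : Int) + d + 1) else r),
         u0 + ((upRun x l).1 : Int), d)
        (upRun x l).2.1 (upRun x l).2.2 := by
  induction l with
  | nil => intro x r u0 d hu hd; simp [upRun, concaveValleyLoop]
  | cons y t ih =>
      intro x r u0 d hu hd
      by_cases hxy : x < y
      · simp only [upRun, if_pos hxy]
        rw [show concaveValleyLoop (r, u0, d) x (y :: t)
              = concaveValleyLoop ((if 0 < d then max r (u0 + 1 + d + 1) else r), u0 + 1, d) y t from by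
          simp only [concaveValleyLoop]
          rw [if_neg (show ¬((u0 > 0 ∧ x > y) ∨ x = y) from by push Not; exact ⟨fun _ => by omega, by omega⟩)]
          rw [if_pos hxy, if_neg (show ¬ x > y from by omega)]
          congr 1
          simp only [Prod.mk.injEq, and_true]
          split_ifs <;> omega]
        rw [ih y _ (u0 + 1) d (by omega) hd]
        congr 2
        · split_ifs <;> push_cast at * <;> omega
        · push_cast; ring
      · simp only [upRun, if_neg hxy]
        simp

-- after a maximal valley the next step resets the counters, so the loop behaves
-- as if restarted from a fresh state
theorem loop_sync (l : List Int) (x y r u d : Int) (h : (0 < u ∧ y < x) ∨ x = y) :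
    concaveValleyLoop (r, u, d) x (y :: l) = concaveValleyLoop (r, 0, 0) x (y :: l) := by
  simp only [concaveValleyLoop]
  congr 1
  rcases h with ⟨hu, hyx⟩ | hxy <;> split_ifs <;> simp_all

theorem main_lemma : ∀ (n : Nat) (l : List Int), l.length ≤ n →
    ∀ (x r : Int), 0 ≤ r → (concaveValleyLoop (r, 0, 0) x l).1 = go r x l := by
  intro n
  induction n with
  | zero =>
      intro l hl x r hr
      have : l = [] := by cases l <;> simp_all
      subst this
      simp [concaveValleyLoop, go, downRun, upRun]
  | succ n ih =>
      intro l hl x r hr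
      rcases hdp : downRun x l with ⟨dc, b, l1⟩
      rcases huq : upRun b l1 with ⟨uc, w, l2⟩
      have hlenp := downRun_len x l
      rw [hdp] at hlenp
      have hlenq := upRun_len b l1
      rw [huq] at hlenq
      simp only [] at hlenp hlenq
      have step1 := loop_down l x r 0
      rw [hdp] at step1
      have step2 := loop_up l1 b r 0 (dc : Int) le_rfl (by positivity)
      rw [huq] at step2
      simp only [zero_add] at step1 step2
      rw [go.eq_def, hdp, huq]
      simp only []
      have hres' : (if 0 < (dc : Int) ∧ 0 < (uc : Int) then max r ((uc : Int) + (dc : Int) + 1) else r)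
          = (if 0 < dc ∧ 0 < uc then max r ((dc : Int) + (uc : Int) + 1) else r) := by
        split_ifs <;> push_cast at * <;> omega
      rw [hres'] at step2
      set r' : Int := if 0 < dc ∧ 0 < uc then max r ((dc : Int) + (uc : Int) + 1) else r with hr'def
      have hr'0 : 0 ≤ r' := by
        rw [hr'def]; split_ifs
        · exact le_trans hr (le_max_left _ _)
        · exact hr
      by_cases hpos : 0 < dc + uc
      · rw [if_pos hpos, step1, step2]
        cases hl2 : l2 with
        | nil => simp [concaveValleyLoop, go, downRun, upRun]
        | cons z t =>
            have hustop : z ≤ w := by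
              have := upRun_stop b l1 z t (by rw [huq, hl2])
              rwa [huq] at this
            have hsync : (0 < (uc : Int) ∧ z < w) ∨ w = z := by
              by_cases huc : uc = 0
              · right
                have hue := upRun_zero b l1 (by rw [huq]; exact huc)
                rw [huq] at hue
                have hwb : w = b := congrArg (fun p => p.2.1) hue
                have hl21 : l2 = l1 := congrArg (fun p => p.2.2) hue
                have hdstop : b ≤ z := by
                  have h := downRun_stop x l z t (by rw [hdp]; show l1 = z :: t; rw [← hl21]; exact hl2)
                  rwa [hdp] at h
                omega
              · by_cases hwz : w = z
                · right; exact hwz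
                · left
                  exact ⟨by exact_mod_cast Nat.pos_of_ne_zero huc, by omega⟩
            rw [loop_sync t w z r' ((uc : Nat) : Int) (dc : Int) hsync]
            refine ih (z :: t) ?_ w r' hr'0
            rw [← hl2]
            omega
      · rw [if_neg hpos]
        have hdc : dc = 0 := by omega
        have huc : uc = 0 := by omega
        subst hdc huc
        have hde := downRun_zero x l (by rw [hdp])
        rw [hdp] at hde
        have hbx : b = x := congrArg (fun p => p.2.1) hde
        have hl1l : l1 = l := congrArg (fun p => p.2.2) hde
        have hue := upRun_zero b l1 (by rw [huq])
        rw [huq] at hue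
        have hwb : w = b := congrArg (fun p => p.2.1) hue
        have hl2l1 : l2 = l1 := congrArg (fun p => p.2.2) hue
        cases hll : l with
        | nil => simp [concaveValleyLoop]
        | cons y t =>
            have hxy : x = y := by
              have hd : b ≤ y := by
                have h := downRun_stop x l y t (by rw [hdp]; show l1 = y :: t; rw [hl1l, hll])
                rwa [hdp] at h
              have hu : y ≤ w := by
                have h := upRun_stop b l1 y t (by rw [huq]; show l2 = y :: t; rw [hl2l1, hl1l, hll])
                rwa [huq] at h
              omega
            subst hxy
            rw [show concaveValleyLoop (r, 0, 0) x (x :: t) = concaveValleyLoop (r, 0, 0) x t from by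
              simp only [concaveValleyLoop]
              congr 1
              split_ifs <;> simp_all]
            exact ih t (by rw [hll] at hl; simp at hl; omega) x r hr

-- ===== VERDICT (by name: the statement is the Claim_ definition above) =====
theorem concaveValley_spec : Claim_equal_concaveValley := by
  intro X _
  unfold Spec_concaveValley concaveValley concaveValley_alt
  cases X with
  | nil => rfl
  | cons x r => exact main_lemma r.length r le_rfl x 0 le_rfl
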